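-- pv_equiv track=rewrite | github.com/muhammed-ayman/codeforces-solutions | 1272A/main.py | compute_minimum_distance
-- ===== SOURCE A (Python) =====
-- def compute_minimum_distance(input_arr):
--     for i in range(len(input_arr)):
--         input_arr[i] = int(input_arr[i])
--     input_arr.sort()
--     if (input_arr[0] == input_arr[1]) and (input_arr[1] == input_arr[2]):
--         return 0
--
--     if ((input_arr[2] - input_arr[1]) >= 2) and (input_arr[0] == input_arr[1]):
--         input_arr[2] -= 2
--         res = abs(input_arr[2] - input_arr[1]) + abs(input_arr[1] - input_arr[0]) + abs(input_arr[2] - input_arr[0])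
--         return res
--     if ((input_arr[1] - input_arr[0]) >= 2) and (input_arr[2] == input_arr[1]):
--         input_arr[0] += 2
--         res = abs(input_arr[2] - input_arr[1]) + abs(input_arr[1] - input_arr[0]) + abs(input_arr[2] - input_arr[0])
--         return res
--
--     if input_arr[0] != input_arr[1]:
--         input_arr[0] += 1
--     if input_arr[1] != input_arr[2]:
--         input_arr[2] -= 1
--
--     res = abs(input_arr[2] - input_arr[1]) + abs(input_arr[1] - input_arr[0]) + abs(input_arr[2] - input_arr[0])
--     return res
-- ===== SOURCE B (Python) =====
-- def compute_minimum_distance(input_arr):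
--     # closed form: with a <= b <= c the three smallest values, the answer is 2*max(0, c-a-2)
--     a, _, c = sorted(int(x) for x in input_arr)[:3]
--     return 2 * max(0, c - a - 2)
-- ===== Notes on version B (the rewrite author's own statement) =====
-- stated objective: simpler
-- what changed: Replaces A's in-place sort plus four-way case analysis (all-equal, the two +-2 special cases, the +1/-1 adjustment) with the single closed form 2*max(0, c-a-2) on the smallest and third-smallest elements.
import Mathlib
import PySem

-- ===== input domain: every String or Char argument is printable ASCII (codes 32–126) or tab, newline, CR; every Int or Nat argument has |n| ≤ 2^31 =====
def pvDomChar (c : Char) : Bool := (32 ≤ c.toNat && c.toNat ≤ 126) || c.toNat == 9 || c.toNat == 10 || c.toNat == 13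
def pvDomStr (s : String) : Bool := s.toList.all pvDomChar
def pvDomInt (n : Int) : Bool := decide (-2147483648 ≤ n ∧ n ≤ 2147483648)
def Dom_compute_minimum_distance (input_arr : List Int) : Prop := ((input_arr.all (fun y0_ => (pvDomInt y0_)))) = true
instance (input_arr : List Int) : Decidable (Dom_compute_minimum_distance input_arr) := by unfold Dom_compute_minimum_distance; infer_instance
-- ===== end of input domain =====

-- B replaces A's sort-then-case-analysis with the closed form 2*max(0, c-a-2); equivalence is about
-- the RETURN value only (A mutates input_arr in place: int conversion, sort, branch adjustments; B does not).

-- ===== PORT A =====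
-- int(x) on an int is the identity; xs[0]/xs[1]/xs[2] after sort raise IndexError when the
-- list has fewer than 3 elements — those inputs are excluded by Pre_ (the `_ => 0` arm is unreachable there).
def compute_minimum_distance (input_arr : List Int) : Int :=
  let arr := PySem.List.sorted (input_arr.map (fun x => x)) (fun x => x) false
  match arr with
  | a :: b :: c :: _ =>
    if a = b ∧ b = c then 0
    else if c - b ≥ 2 ∧ a = b then
      let c' := c - 2
      |c' - b| + |b - a| + |c' - a|
    else if b - a ≥ 2 ∧ c = b then
      let a' := a + 2
      |c - b| + |b - a'| + |c - a'|
    else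
      let a' := if a ≠ b then a + 1 else a
      let c' := if b ≠ c then c - 1 else c
      |c' - b| + |b - a'| + |c' - a'|
  | _ => 0

-- ===== PORT B =====
-- sorted(...)[:3] then unpack a, _, c; with fewer than 3 elements the unpack raises ValueError in
-- Python (excluded by Pre_) — the length guard and catch-all arm totalise exactly that case with 0.
def compute_minimum_distance_alt (input_arr : List Int) : Int :=
  let t := (PySem.List.sorted (input_arr.map (fun x => x)) (fun x => x) false).take 3
  match t.head?, t.getLast? with
  | some a, some c => if t.length = 3 then 2 * max 0 (c - a - 2) else 0
  | _, _ => 0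

-- ===== PRECONDITION & SPEC =====
-- Pre_ : A indexes the first three elements, so it raises IndexError on lists shorter than 3.
def Pre_compute_minimum_distance (input_arr : List Int) : Prop := 3 ≤ input_arr.length
instance (input_arr : List Int) : Decidable (Pre_compute_minimum_distance input_arr) := by unfold Pre_compute_minimum_distance; infer_instance
def pvWitness_compute_minimum_distance : List Int := [4, 1, 7]

def Spec_compute_minimum_distance (input_arr : List Int) (out : Int) : Prop := out = compute_minimum_distance_alt input_arr
instance (input_arr : List Int) (out : Int) : Decidable (Spec_compute_minimum_distance input_arr out) := by unfold Spec_compute_minimum_distance; infer_instance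

-- ===== CLAIM (what is proved, stated in full; the proofs are below) =====
def Claim_equal_compute_minimum_distance : Prop := ∀ (input_arr : List Int), Dom_compute_minimum_distance input_arr → Pre_compute_minimum_distance input_arr → Spec_compute_minimum_distance input_arr (compute_minimum_distance input_arr)

-- ===== LEMMAS AND PROOFS =====

-- On a sorted head a ≤ b ≤ c, all of A's branches collapse to 2*max(0, c-a-2).
theorem branches_eq_closed_form (a b c : Int) (hab : a ≤ b) (hbc : b ≤ c) :
    (if a = b ∧ b = c then (0 : Int)
     else if c - b ≥ 2 ∧ a = b then
       let c' := c - 2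
       |c' - b| + |b - a| + |c' - a|
     else if b - a ≥ 2 ∧ c = b then
       let a' := a + 2
       |c - b| + |b - a'| + |c - a'|
     else
       let a' := if a ≠ b then a + 1 else a
       let c' := if b ≠ c then c - 1 else c
       |c' - b| + |b - a'| + |c' - a'|) = 2 * max 0 (c - a - 2) := by
  split_ifs <;> simp_all [abs_eq_max_neg, max_def] <;> split_ifs <;> omega

-- ===== VERDICT (by name: the statement is the Claim_ definition above) =====
theorem compute_minimum_distance_spec : Claim_equal_compute_minimum_distance := by
  intro input_arr _ hpre
  unfold Spec_compute_minimum_distance compute_minimum_distance compute_minimum_distance_alt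
  have hlen : 3 ≤ (PySem.List.sorted (input_arr.map (fun x => x)) (fun x => x) false).length := by
    rw [PySem.List.length_sorted, List.length_map]; exact hpre
  obtain ⟨a, b, c, rest, hs⟩ : ∃ a b c rest,
      PySem.List.sorted (input_arr.map (fun x => x)) (fun x => x) false = a :: b :: c :: rest := by
    match h : PySem.List.sorted (input_arr.map (fun x => x)) (fun x => x) false with
    | a :: b :: c :: rest => exact ⟨a, b, c, rest, rfl⟩
    | [] | [_] | [_, _] => rw [h] at hlen; simp at hlen
  have hpw := PySem.List.sorted_pairwise (xs := input_arr.map (fun x => x)) (key := fun x => x)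
  rw [hs] at hpw
  simp only [List.pairwise_cons] at hpw
  have hab : a ≤ b := hpw.1 b (by simp)
  have hbc : b ≤ c := hpw.2.1 c (by simp)
  rw [hs]
  simpa using branches_eq_closed_form a b c hab hbc
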